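-- pv_equiv track=rewrite | github.com/mirrezaei/aynaz_interview_code25 | dynamic/constructArray.py | countArray
-- ===== SOURCE A (Python) =====
-- def countArray(n, k, x): #compress dynamic approach in order O(n)
--     a = [[0 for i in range(3)] for j in range(n + 1)]
--     a[1][1] = 1
--     for i in range(2, n + 1):
--         a[i][1]=(a[i-1][2]*(k-1))%(10**9+7)
--         a[i][2]=(a[i-1][2]*(k-2)+a[i-1][1])%(10**9+7)
--     if(x==1):
--         return a[n][1]%(10**9+7)
--     else:
--         return a[n][2]%(10**9+7)
-- ===== SOURCE B (Python) =====
-- def countArray(n, k, x):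
--     # O(log n): 2x2 matrix exponentiation of the recurrence
--     # f(i) = (k-1)*g(i-1), g(i) = (k-2)*g(i-1) + f(i-1), f(1)=1, g(1)=0
--     p = 10**9 + 7
--
--     def mul(A, B):
--         a, b, c, d = A
--         e, f, g, h = B
--         return ((a*e + b*g) % p, (a*f + b*h) % p,
--                 (c*e + d*g) % p, (c*f + d*h) % p)
--
--     def mpow(M, e):
--         if e <= 0:
--             return (1, 0, 0, 1)
--         H = mpow(M, e // 2)
--         S = mul(H, H)
--         return mul(S, M) if e % 2 == 1 else S
--
--     M = (0, (k - 1) % p, 1, (k - 2) % p)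
--     a, b, c, d = mpow(M, n - 1)
--     f = (a * 1 + b * 0) % p
--     g = (c * 1 + d * 0) % p
--     return f % p if x == 1 else g % p
-- ===== Notes on version B (the rewrite author's own statement) =====
-- stated objective: faster
-- what changed: Replaces the O(n) DP table with 2x2 matrix exponentiation of the two-state recurrence modulo 10^9+7, computing the answer in O(log n) multiplications.
import Mathlib
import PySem

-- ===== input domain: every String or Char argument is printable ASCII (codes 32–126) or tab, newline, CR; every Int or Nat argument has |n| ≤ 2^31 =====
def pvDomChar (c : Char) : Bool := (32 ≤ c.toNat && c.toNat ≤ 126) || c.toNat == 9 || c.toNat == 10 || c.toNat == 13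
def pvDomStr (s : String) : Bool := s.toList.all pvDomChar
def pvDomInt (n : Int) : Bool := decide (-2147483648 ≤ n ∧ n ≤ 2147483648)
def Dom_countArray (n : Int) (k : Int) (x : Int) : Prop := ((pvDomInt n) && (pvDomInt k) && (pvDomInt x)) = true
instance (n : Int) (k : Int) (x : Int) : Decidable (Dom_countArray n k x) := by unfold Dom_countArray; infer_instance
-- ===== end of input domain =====

-- B replaces A's O(n) DP table with 2x2 matrix exponentiation modulo 10^9+7 (objective: faster).

def PMOD : Int := 1000000007

-- ===== PORT A =====
-- Python's list-of-lists table as an Array of rows (a[i][j]; all indices are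
-- in range under Pre_, so the getD defaults are never used)
def tget (a : Array (List Int)) (i j : Int) : Int := (a[i.toNat]?.getD [])[j.toNat]?.getD 0
def tset (a : Array (List Int)) (i j v : Int) : Array (List Int) :=
  a.setIfInBounds i.toNat ((a[i.toNat]?.getD []).set j.toNat v)

-- the body of A's for-loop; the state is the whole table
def aLoop (k : Int) (a : Array (List Int)) (i : Int) : Array (List Int) :=
  let a1 := tset a i 1 ((tget a (i-1) 2 * (k-1)) % PMOD)
  tset a1 i 2 ((tget a1 (i-1) 2 * (k-2) + tget a1 (i-1) 1) % PMOD)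

def countArray (n : Int) (k : Int) (x : Int) : Int :=
  let a0 := Array.replicate (n+1).toNat (List.replicate 3 (0:Int))
  let a1 := tset a0 1 1 1
  let a := (PySem.List.pyRange 2 (n+1) 1).foldl (aLoop k) a1
  if x == 1 then tget a n 1 % PMOD else tget a n 2 % PMOD

-- ===== PORT B =====
-- 2x2 matrix ((a,b),(c,d)) as a 4-tuple, entries kept mod PMOD
def matmul : (Int × Int × Int × Int) → (Int × Int × Int × Int) → (Int × Int × Int × Int)
  | (a,b,c,d), (e,f,g,h) =>
    ((a*e + b*g) % PMOD, (a*f + b*h) % PMOD, (c*e + d*g) % PMOD, (c*f + d*h) % PMOD)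

-- Source B's mpow; the extra fuel argument (first) only makes the halving recursion structural
def matpowF (M : Int × Int × Int × Int) : Nat → Nat → (Int × Int × Int × Int)
  | _, 0 => (1, 0, 0, 1)
  | 0, _+1 => (1, 0, 0, 1)         -- never reached: fuel ≥ e in every call
  | fuel+1, e+1 =>
    let H := matpowF M fuel ((e+1)/2)
    let S := matmul H H
    if (e+1) % 2 == 1 then matmul S M else S

def matpow (M : Int × Int × Int × Int) (e : Nat) : (Int × Int × Int × Int) := matpowF M e e

def countArray_alt (n : Int) (k : Int) (x : Int) : Int :=
  let M := ((0:Int), (k-1) % PMOD, (1:Int), (k-2) % PMOD)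
  match matpow M (n-1).toNat with
  | (a,b,c,d) =>
    let f := (a*1 + b*0) % PMOD
    let g := (c*1 + d*0) % PMOD
    if x == 1 then f % PMOD else g % PMOD

-- ===== PRECONDITION & SPEC =====
-- A raises IndexError for n < 1 (a[1][1] = 1 on a table with fewer than two rows)
def Pre_countArray (n : Int) (k : Int) (x : Int) : Prop := 1 ≤ n
instance (n : Int) (k : Int) (x : Int) : Decidable (Pre_countArray n k x) := by unfold Pre_countArray; infer_instance

def pvWitness_countArray : Int × Int × Int := (4, 3, 2)

def Spec_countArray (n : Int) (k : Int) (x : Int) (out : Int) : Prop := out = countArray_alt n k x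
instance (n : Int) (k : Int) (x : Int) (out : Int) : Decidable (Spec_countArray n k x out) := by unfold Spec_countArray; infer_instance

-- ===== CLAIM (what is proved, stated in full; the proofs are below) =====
def Claim_equal_countArray : Prop := ∀ (n : Int) (k : Int) (x : Int), Dom_countArray n k x → Pre_countArray n k x → Spec_countArray n k x (countArray n k x)

-- ===== LEMMAS AND PROOFS =====

-- one step of the recurrence, modulo PMOD
def step (k : Int) (v : Int × Int) : Int × Int :=
  ((v.2 * (k-1)) % PMOD, (v.2 * (k-2) + v.1) % PMOD)

-- matrix-vector application mod PMOD (proof-side only)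
def vapp (A : Int × Int × Int × Int) (v : Int × Int) : Int × Int :=
  ((A.1 * v.1 + A.2.1 * v.2) % PMOD, (A.2.2.1 * v.1 + A.2.2.2 * v.2) % PMOD)

lemma addmul_mod (x u y w : Int) :
    (x % PMOD * u + y % PMOD * w) % PMOD = (x*u + y*w) % PMOD := by
  conv_lhs => rw [Int.add_emod, Int.mul_emod (x % PMOD) u, Int.emod_emod_of_dvd x dvd_rfl,
    ← Int.mul_emod, Int.mul_emod (y % PMOD) w, Int.emod_emod_of_dvd y dvd_rfl,
    ← Int.mul_emod, ← Int.add_emod]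

lemma addmul_mod' (u x w y : Int) :
    (u * (x % PMOD) + w * (y % PMOD)) % PMOD = (u*x + w*y) % PMOD := by
  conv_lhs => rw [Int.add_emod, Int.mul_emod u (x % PMOD), Int.emod_emod_of_dvd x dvd_rfl,
    ← Int.mul_emod, Int.mul_emod w (y % PMOD), Int.emod_emod_of_dvd y dvd_rfl,
    ← Int.mul_emod, ← Int.add_emod]

lemma vapp_matmul (A B : Int × Int × Int × Int) (v : Int × Int) :
    vapp (matmul A B) v = vapp A (vapp B v) := by
  obtain ⟨a,b,c,d⟩ := A; obtain ⟨e,f,g,h⟩ := B; obtain ⟨p,q⟩ := v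
  simp only [matmul, vapp]
  rw [Prod.mk.injEq]
  constructor <;> · rw [addmul_mod, addmul_mod']; congr 1; ring

lemma vapp_M (k : Int) (v : Int × Int) :
    vapp ((0:Int), (k-1) % PMOD, (1:Int), (k-2) % PMOD) v = step k v := by
  obtain ⟨p,q⟩ := v
  simp only [vapp, step]
  rw [Prod.mk.injEq]
  constructor
  · have h0 : (0:Int)*p + (k-1) % PMOD * q = 0 % PMOD * p + (k-1) % PMOD * q := by norm_num
    rw [h0, addmul_mod]; congr 1; ring
  · have hone : (1:Int) % PMOD = 1 := by decide
    have h1 : (1:Int)*p + (k-2) % PMOD * q = 1 % PMOD * p + (k-2) % PMOD * q := by rw [hone]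
    rw [h1, addmul_mod]; congr 1; ring

lemma step_reduced (k : Int) (v : Int × Int) :
    (step k v).1 % PMOD = (step k v).1 ∧ (step k v).2 % PMOD = (step k v).2 :=
  ⟨Int.emod_emod_of_dvd _ dvd_rfl, Int.emod_emod_of_dvd _ dvd_rfl⟩

lemma iterate_reduced (k : Int) (m : Nat) (v : Int × Int)
    (hv : v.1 % PMOD = v.1 ∧ v.2 % PMOD = v.2) :
    ((step k)^[m] v).1 % PMOD = ((step k)^[m] v).1 ∧
    ((step k)^[m] v).2 % PMOD = ((step k)^[m] v).2 := by
  cases m with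
  | zero => simpa using hv
  | succ m => rw [Function.iterate_succ_apply']; exact step_reduced k _

lemma vapp_id (v : Int × Int) (hv : v.1 % PMOD = v.1 ∧ v.2 % PMOD = v.2) :
    vapp (1, 0, 0, 1) v = v := by
  obtain ⟨p,q⟩ := v
  simp only [vapp]
  rw [Prod.mk.injEq]
  obtain ⟨h1, h2⟩ := hv
  constructor
  · rw [show (1:Int)*p + 0*q = p by ring]; exact h1
  · rw [show (0:Int)*p + 1*q = q by ring]; exact h2

-- applying matpowF M fuel e equals iterating the step e times (fuel ≥ e, reduced input)
lemma matpowF_apply (k : Int) : ∀ (fuel e : Nat), e ≤ fuel → ∀ (v : Int × Int),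
    v.1 % PMOD = v.1 → v.2 % PMOD = v.2 →
    vapp (matpowF ((0:Int), (k-1) % PMOD, (1:Int), (k-2) % PMOD) fuel e) v = (step k)^[e] v := by
  intro fuel
  induction fuel with
  | zero =>
    intro e he v h1 h2
    interval_cases e
    simpa [matpowF] using vapp_id v ⟨h1, h2⟩
  | succ fuel ih =>
    intro e he v h1 h2
    cases e with
    | zero => simpa [matpowF] using vapp_id v ⟨h1, h2⟩
    | succ e =>
      have hq : (e+1)/2 ≤ fuel := by omega
      have hred := iterate_reduced k ((e+1)/2) v ⟨h1, h2⟩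
      by_cases hodd : (e+1) % 2 = 1
      · have hsplit : (e+1)/2 + ((e+1)/2 + 1) = e + 1 := by omega
        simp only [matpowF, hodd]
        rw [if_pos (by simp), vapp_matmul, vapp_matmul, vapp_M,
          ih _ hq _ (step_reduced k v).1 (step_reduced k v).2,
          ih _ hq _ (iterate_reduced k _ _ ⟨(step_reduced k v).1, (step_reduced k v).2⟩).1
                    (iterate_reduced k _ _ ⟨(step_reduced k v).1, (step_reduced k v).2⟩).2,
          ← Function.iterate_succ_apply (step k), ← Function.iterate_add_apply, hsplit]
      · have hsplit : (e+1)/2 + (e+1)/2 = e + 1 := by omega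
        simp only [matpowF]
        rw [if_neg (by simpa using hodd), vapp_matmul,
          ih _ hq _ h1 h2,
          ih _ hq _ hred.1 hred.2,
          ← Function.iterate_add_apply, hsplit]


-- ---- table lemmas for A ----

lemma tset_size (a : Array (List Int)) (i j v : Int) : (tset a i j v).size = a.size := by
  simp [tset]

lemma tset_rows (a : Array (List Int)) (i j v : Int)
    (h3 : ∀ t : Nat, t < a.size → (a[t]?.getD []).length = 3) :
    ∀ t : Nat, t < (tset a i j v).size → ((tset a i j v)[t]?.getD []).length = 3 := by
  intro t ht
  rw [tset_size] at ht
  unfold tset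
  by_cases hti : i.toNat = t
  · subst hti
    rw [Array.getElem?_setIfInBounds_self_of_lt ht, Option.getD_some, List.length_set]
    exact h3 _ ht
  · rw [Array.getElem?_setIfInBounds_ne hti]
    exact h3 t ht

lemma tget_tset_same (a : Array (List Int)) (i j v : Int)
    (hi : i.toNat < a.size) (hj : j.toNat < (a[i.toNat]?.getD []).length) :
    tget (tset a i j v) i j = v := by
  unfold tget tset
  rw [Array.getElem?_setIfInBounds_self_of_lt hi, Option.getD_some,
    List.getElem?_set_self hj, Option.getD_some]

lemma tget_tset_row_ne (a : Array (List Int)) (i j v i' j' : Int) (h : i.toNat ≠ i'.toNat) :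
    tget (tset a i j v) i' j' = tget a i' j' := by
  unfold tget tset
  rw [Array.getElem?_setIfInBounds_ne h]

lemma tget_tset_col_ne (a : Array (List Int)) (i j v j' : Int)
    (hi : i.toNat < a.size) (h : j.toNat ≠ j'.toNat) :
    tget (tset a i j v) i j' = tget a i j' := by
  unfold tget tset
  rw [Array.getElem?_setIfInBounds_self_of_lt hi, Option.getD_some, List.getElem?_set_ne h]

-- invariant of A's fold: after processing rows i..i+m-1, row i+m-1 holds step^[m] of (f,g)
lemma fold_inv (k : Int) (m : Nat) : ∀ (i : Int) (a : Array (List Int)) (f g : Int),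
    2 ≤ i → i.toNat + m ≤ a.size → (∀ t : Nat, t < a.size → (a[t]?.getD []).length = 3) →
    tget a (i-1) 1 = f → tget a (i-1) 2 = g →
    tget ((PySem.List.pyRange i (i+(m:Int)) 1).foldl (aLoop k) a) (i+(m:Int)-1) 1 = ((step k)^[m] (f,g)).1 ∧
    tget ((PySem.List.pyRange i (i+(m:Int)) 1).foldl (aLoop k) a) (i+(m:Int)-1) 2 = ((step k)^[m] (f,g)).2 := by
  induction m with
  | zero =>
    intro i a f g h2 hlen h3 hf hg
    simp only [Nat.cast_zero, add_zero, PySem.List.pyRange_one_eq_nil (le_refl i),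
      List.foldl_nil, Function.iterate_zero, id]
    exact ⟨hf, hg⟩
  | succ m ih =>
    intro i a f g h2 hlen h3 hf hg
    have hilt : i.toNat < a.size := by omega
    have hrow : (a[i.toNat]?.getD []).length = 3 := h3 _ hilt
    have hne : i.toNat ≠ (i-1).toNat := by omega
    have hidx : i + ((m+1 : Nat) : Int) = (i+1) + (m:Int) := by push_cast; ring
    rw [hidx, PySem.List.pyRange_one_cons (by omega), List.foldl_cons]
    -- compute the loop body at row i
    have hA : aLoop k a i
        = tset (tset a i 1 ((g*(k-1))%PMOD)) i 2 ((g*(k-2)+f)%PMOD) := by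
      simp only [aLoop]
      rw [tget_tset_row_ne a i 1 _ (i-1) 2 hne, tget_tset_row_ne a i 1 _ (i-1) 1 hne, hf, hg]
    have hlt1 : i.toNat < (tset a i 1 ((g*(k-1))%PMOD)).size := by rw [tset_size]; exact hilt
    have hrow1 : ((tset a i 1 ((g*(k-1))%PMOD))[i.toNat]?.getD []).length = 3 := by
      unfold tset
      rw [Array.getElem?_setIfInBounds_self_of_lt hilt, Option.getD_some, List.length_set]
      exact hrow
    have t1 : tget (aLoop k a i) i 1 = (g*(k-1))%PMOD := by
      rw [hA, tget_tset_col_ne _ _ _ _ _ hlt1 (by decide)]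
      exact tget_tset_same _ _ _ _ hilt (by omega)
    have t2 : tget (aLoop k a i) i 2 = (g*(k-2)+f)%PMOD := by
      rw [hA]
      exact tget_tset_same _ _ _ _ hlt1 (by omega)
    have hlen' : (i+1).toNat + m ≤ (aLoop k a i).size := by
      rw [hA, tset_size, tset_size]; omega
    have h3' : ∀ t : Nat, t < (aLoop k a i).size → ((aLoop k a i)[t]?.getD []).length = 3 := by
      rw [hA]; exact tset_rows _ _ _ _ (tset_rows _ _ _ _ h3)
    have hstep : step k (f, g) = ((g*(k-1))%PMOD, (g*(k-2)+f)%PMOD) := rfl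
    have hgoal := ih (i+1) (aLoop k a i) ((g*(k-1))%PMOD) ((g*(k-2)+f)%PMOD)
      (by omega) hlen' h3' (by rw [add_sub_cancel_right]; exact t1) (by rw [add_sub_cancel_right]; exact t2)
    rw [Function.iterate_succ_apply, hstep]
    exact hgoal

-- ===== VERDICT (by name: the statement is the Claim_ definition above) =====
theorem countArray_spec : Claim_equal_countArray := by
  intro n k x _ hpre
  have hn : (1:Int) ≤ n := hpre
  unfold Spec_countArray countArray countArray_alt
  set m := (n-1).toNat with hmdef
  have hm : (m:Int) = n - 1 := Int.toNat_of_nonneg (by omega)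
  -- B side: the matrix power acts as m iterations of the step
  rcases hM : matpow ((0:Int), (k-1) % PMOD, (1:Int), (k-2) % PMOD) m with ⟨A,B,C,D⟩
  have happ : vapp (A,B,C,D) ((1:Int),(0:Int)) = (step k)^[m] (1,0) := by
    rw [← hM]
    exact matpowF_apply k m m le_rfl (1,0) (by decide) (by decide)
  have hB1 : (A*1 + B*0) % PMOD = ((step k)^[m] ((1:Int),(0:Int))).1 := congrArg Prod.fst happ
  have hB2 : (C*1 + D*0) % PMOD = ((step k)^[m] ((1:Int),(0:Int))).2 := congrArg Prod.snd happ
  -- A side: the fold over the table computes the same iteration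
  set a0 := Array.replicate (n+1).toNat (List.replicate 3 (0:Int)) with ha0
  have hlen0 : a0.size = (n+1).toNat := by rw [ha0, Array.size_replicate]
  have h30 : ∀ t : Nat, t < a0.size → (a0[t]?.getD []).length = 3 := by
    intro t ht
    rw [hlen0] at ht
    simp only [ha0, Array.getElem?_replicate]
    rw [if_pos ht, Option.getD_some, List.length_replicate]
  have h1lt : (1:Int).toNat < a0.size := by rw [hlen0]; omega
  have hrow0 : (a0[(1:Int).toNat]?.getD []).length = 3 := h30 _ h1lt
  have hf : tget (tset a0 1 1 1) (2-1) 1 = 1 := by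
    rw [show (2:Int)-1 = 1 by ring]
    exact tget_tset_same a0 1 1 1 h1lt (by omega)
  have hg0 : tget (tset a0 1 1 1) (2-1) 2 = 0 := by
    rw [show (2:Int)-1 = 1 by ring, tget_tset_col_ne a0 1 1 1 2 h1lt (by decide)]
    have hrep : a0[(1:Int).toNat]?.getD [] = List.replicate 3 (0:Int) := by
      simp only [ha0, Array.getElem?_replicate]
      rw [if_pos (by rw [hlen0] at h1lt; simpa [ha0] using h1lt), Option.getD_some]
    unfold tget
    rw [hrep]
    decide
  have hb : (2:Int).toNat + m ≤ (tset a0 1 1 1).size := by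
    rw [tset_size, hlen0]; omega
  obtain ⟨H1, H2⟩ := fold_inv k m 2 (tset a0 1 1 1) 1 0 (le_refl 2) hb
    (tset_rows a0 1 1 1 h30) hf hg0
  rw [show (2:Int) + (m:Int) = n + 1 by omega, show (n:Int) + 1 - 1 = n by ring] at H1 H2
  simp only [hM]
  by_cases hx : (x == 1) = true
  · rw [if_pos hx, if_pos hx, H1, ← hB1]
  · rw [if_neg hx, if_neg hx, H2, ← hB2]
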